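-- pv_equiv track=rewrite | github.com/Obayne/AutoFireBase | scripts/tools/strip_stashed_markers.py | _strip_markers
-- ===== SOURCE A (Python) =====
-- def _strip_markers(text: str) -> list[str]:
--     """Return a list of lines with obvious git stash/merge markers removed.
--
--     This is intentionally conservative: if we detect a conflict marker block we
--     leave the file untouched (caller can inspect the .bak file). We do remove
--     literal 'Stashed changes' summary lines that some tools paste into files.
--     """
--     out: list[str] = []
--     for ln in text.splitlines():
--         s = ln.strip()
--         if (
--             s.startswith("<<<<<<<")
--             or s.startswith("=======")
--             or s.startswith(">>>>>>>>")
--         ):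
--             # don't try to auto-resolve real conflict blocks here
--             return []
--         if "Stashed changes" in ln or "stash" in ln.lower():
--             # drop these lines
--             continue
--         out.append(ln)
--     return out
-- ===== SOURCE B (Python) =====
-- def _strip_markers(text: str) -> list[str]:
--     """Detect-then-filter re-implementation: one pass to spot conflict markers,
--     one comprehension to drop stash lines."""
--     lines = text.splitlines()
--     if any(
--         line.strip().startswith(("<<<<<<<", "=======", ">>>>>>>>"))
--         for line in lines
--     ):
--         return []
--     return [
--         ln
--         for ln in lines
--         if "Stashed changes" not in ln and "stash" not in ln.lower()
--     ]
-- ===== Notes on version B (the rewrite author's own statement) =====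
-- stated objective: simpler
-- what changed: Replaces the single interleaved early-exit accumulator loop by a detect-then-filter two-pass structure: an any() scan for conflict markers followed by a list comprehension dropping stash lines.
import Mathlib
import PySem

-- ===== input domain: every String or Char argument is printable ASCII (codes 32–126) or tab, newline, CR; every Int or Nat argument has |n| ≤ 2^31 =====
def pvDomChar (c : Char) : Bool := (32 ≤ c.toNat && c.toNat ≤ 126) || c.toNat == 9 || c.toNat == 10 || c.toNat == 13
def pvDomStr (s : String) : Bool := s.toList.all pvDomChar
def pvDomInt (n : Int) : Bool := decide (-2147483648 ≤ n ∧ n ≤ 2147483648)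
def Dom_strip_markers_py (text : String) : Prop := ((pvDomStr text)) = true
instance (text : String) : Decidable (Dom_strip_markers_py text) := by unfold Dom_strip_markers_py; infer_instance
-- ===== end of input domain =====

-- B replaces A's interleaved early-exit loop by a detect-then-filter two-pass structure (objective: simpler).
-- ===== PORT A =====
def pvIsMarker (ln : String) : Bool :=
  let s := PySem.Str.strip ln
  PySem.Str.startswith s "<<<<<<<" || PySem.Str.startswith s "=======" ||
    PySem.Str.startswith s ">>>>>>>>"

def pvIsStash (ln : String) : Bool :=
  PySem.Str.isIn "Stashed changes" ln || PySem.Str.isIn "stash" (PySem.Str.lower ln)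

-- the for-loop with early 'return []', accumulator 'out', step for step
def pvAGo : List String → List String → List String
  | [], out => out
  | ln :: rest, out =>
    if pvIsMarker ln then []
    else if pvIsStash ln then pvAGo rest out
    else pvAGo rest (out ++ [ln])

def strip_markers_py (text : String) : List String :=
  pvAGo (PySem.Str.splitlines text) []

-- ===== PORT B =====
def strip_markers_py_alt (text : String) : List String :=
  let lines := PySem.Str.splitlines text
  if lines.any pvIsMarker then []
  else lines.filter (fun ln => !pvIsStash ln)

-- ===== PRECONDITION & SPEC =====
def Spec_strip_markers_py (text : String) (out : List String) : Prop := out = strip_markers_py_alt text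
instance (text : String) (out : List String) : Decidable (Spec_strip_markers_py text out) := by unfold Spec_strip_markers_py; infer_instance

-- ===== CLAIM (what is proved, stated in full; the proofs are below) =====
def Claim_equal_strip_markers_py : Prop := ∀ (text : String), Dom_strip_markers_py text → Spec_strip_markers_py text (strip_markers_py text)

-- ===== LEMMAS AND PROOFS =====
theorem pvAGo_eq (lns : List String) : ∀ out : List String,
    pvAGo lns out =
      if lns.any pvIsMarker then [] else out ++ lns.filter (fun ln => !pvIsStash ln) := by
  induction lns with
  | nil => intro out; simp [pvAGo]
  | cons ln rest ih =>
    intro out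
    by_cases hm : pvIsMarker ln
    · simp [pvAGo, hm]
    · by_cases hs : pvIsStash ln <;>
        simp [pvAGo, hm, hs, ih, List.filter_cons]

-- ===== VERDICT (by name: the statement is the Claim_ definition above) =====
theorem strip_markers_py_spec : Claim_equal_strip_markers_py := by
  intro text _
  unfold Spec_strip_markers_py strip_markers_py strip_markers_py_alt
  simp [pvAGo_eq]
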